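-- pv_equiv track=rewrite | github.com/Gongzai-SURE/MixQuant | mixq/allocate/allocate_utils.py | same_layer_reset
-- ===== SOURCE A (Python) =====
-- param_order = [
--         "self_attn.q_proj",
--         "self_attn.k_proj",
--         "self_attn.v_proj",
--         "self_attn.o_proj",
--         "mlp.gate_proj",
--         "mlp.up_proj",
--         "mlp.down_proj"
--     ]
--
-- def same_layer_reset(data):
--     # 计算 layer 数量
--     num_layers = len(data) // len(param_order)
--
--     # 初始化结果字典
--     result = {param: [] for param in param_order}
--
--     # 按顺序填充数据
--     for i in range(num_layers):
--         start_idx = i * len(param_order)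
--         layer_data = data[start_idx : start_idx + len(param_order)]
--
--         for param, value in zip(param_order, layer_data):
--             result[param].append(value)
--
--     return result
-- ===== SOURCE B (Python) =====
-- param_order = [
--         "self_attn.q_proj",
--         "self_attn.k_proj",
--         "self_attn.v_proj",
--         "self_attn.o_proj",
--         "mlp.gate_proj",
--         "mlp.up_proj",
--         "mlp.down_proj"
--     ]
--
-- def same_layer_reset(data):
--     k = len(param_order)
--     n = len(data) // k
--     return {p: [data[j + i * k] for i in range(n)] for j, p in enumerate(param_order)}
-- ===== Notes on version B (the rewrite author's own statement) =====
-- stated objective: simpler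
-- what changed: Replaced the nested layers-by-params loop that scatters values into a pre-initialised mutable dict with a single dict comprehension that gathers each key's column directly by strided indexing.
import Mathlib
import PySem

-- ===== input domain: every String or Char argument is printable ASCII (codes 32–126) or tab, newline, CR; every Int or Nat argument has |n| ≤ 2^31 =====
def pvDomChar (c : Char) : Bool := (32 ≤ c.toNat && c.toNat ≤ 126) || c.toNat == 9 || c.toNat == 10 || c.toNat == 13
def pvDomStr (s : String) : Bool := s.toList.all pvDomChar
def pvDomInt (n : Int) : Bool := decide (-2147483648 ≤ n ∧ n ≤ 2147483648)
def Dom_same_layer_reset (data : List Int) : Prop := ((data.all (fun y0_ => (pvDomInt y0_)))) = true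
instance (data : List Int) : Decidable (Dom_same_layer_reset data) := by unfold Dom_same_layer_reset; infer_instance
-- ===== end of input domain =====

-- B replaces A's nested layers×params loop scattering into a mutable dict by a per-key
-- gather (dict comprehension with strided indexing); same cost, simpler decomposition.

-- ===== PORT A =====
def param_order : List String :=
  ["self_attn.q_proj", "self_attn.k_proj", "self_attn.v_proj", "self_attn.o_proj",
   "mlp.gate_proj", "mlp.up_proj", "mlp.down_proj"]

-- body of A's outer loop (named for the proofs; the same computation, step for step)
def pvOuterStep (data : List Int) (result : PySem.Dict String (List Int)) (i : Int) :
    PySem.Dict String (List Int) :=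
  let startIdx := i * (param_order.length : Int)
  let layerData := PySem.List.slice data (some startIdx) (some (startIdx + (param_order.length : Int)))
  (param_order.zip layerData).foldl
    (fun r pv => PySem.Dict.modify r pv.1 [] (fun l => l ++ [pv.2])) result
    -- result[param].append(value): the key is always present (result was initialised
    -- with every key of param_order), so Dict.modify is exact here

def same_layer_reset (data : List Int) : List (String × List Int) :=
  let numLayers := PySem.Int.floordiv (data.length : Int) (param_order.length : Int)
  let result : PySem.Dict String (List Int) :=
    param_order.foldl (fun d p => PySem.Dict.insert d p ([] : List Int)) ⟨[]⟩
  ((PySem.List.pyRange 0 numLayers).foldl (pvOuterStep data) result).items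

-- ===== PORT B =====
def same_layer_reset_alt (data : List Int) : List (String × List Int) :=
  let k : Int := (param_order.length : Int)
  let n : Int := PySem.Int.floordiv (data.length : Int) k
  ((PySem.List.enumerate param_order).foldl
    (fun d jp => PySem.Dict.insert d jp.2
      ((PySem.List.pyRange 0 n).map (fun i => PySem.List.pyGetD data (jp.1 + i * k) 0)))
    ⟨[]⟩).items
    -- data[j + i*k]: always in range (j < k, i < n, n*k ≤ len(data)), so pyGetD is exact

-- ===== PRECONDITION & SPEC =====
def Spec_same_layer_reset (data : List Int) (out : List (String × List Int)) : Prop := out = same_layer_reset_alt data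
instance (data : List Int) (out : List (String × List Int)) : Decidable (Spec_same_layer_reset data out) := by unfold Spec_same_layer_reset; infer_instance

-- ===== CLAIM (what is proved, stated in full; the proofs are below) =====
def Claim_equal_same_layer_reset : Prop := ∀ (data : List Int), Dom_same_layer_reset data → Spec_same_layer_reset data (same_layer_reset data)

-- ===== LEMMAS AND PROOFS =====

-- column j of the first m layers: the canonical value both sides are reduced to
def colUpto (data : List Int) (j m : Nat) : List Int :=
  (List.range m).map (fun i => data.getD (i * 7 + j) 0)

def canon (data : List Int) (m : Nat) : List (String × List Int) :=
  [("self_attn.q_proj", colUpto data 0 m), ("self_attn.k_proj", colUpto data 1 m),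
   ("self_attn.v_proj", colUpto data 2 m), ("self_attn.o_proj", colUpto data 3 m),
   ("mlp.gate_proj", colUpto data 4 m), ("mlp.up_proj", colUpto data 5 m),
   ("mlp.down_proj", colUpto data 6 m)]

lemma colUpto_succ (data : List Int) (j m : Nat) :
    colUpto data j (m + 1) = colUpto data j m ++ [data.getD (m * 7 + j) 0] := by
  simp [colUpto, List.range_succ]

lemma getD_drop (data : List Int) (m t : Nat) :
    (data.drop m).getD t 0 = data.getD (m + t) 0 := by
  simp [List.getD_eq_getElem?_getD, List.getElem?_drop]

lemma take7 (l : List Int) (h : 7 ≤ l.length) :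
    l.take 7 = [l.getD 0 0, l.getD 1 0, l.getD 2 0, l.getD 3 0, l.getD 4 0,
                l.getD 5 0, l.getD 6 0] := by
  rcases l with _ | ⟨a0, _ | ⟨a1, _ | ⟨a2, _ | ⟨a3, _ | ⟨a4, _ | ⟨a5, _ | ⟨a6, t⟩⟩⟩⟩⟩⟩⟩ <;>
    simp_all

-- one pass of A's inner zip-fold on a dict carrying exactly the seven keys, in order
lemma inner_step (a0 a1 a2 a3 a4 a5 a6 : List Int) (x0 x1 x2 x3 x4 x5 x6 : Int) :
    (param_order.zip [x0, x1, x2, x3, x4, x5, x6]).foldl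
      (fun r pv => PySem.Dict.modify r pv.1 [] (fun l => l ++ [pv.2]))
      ⟨[("self_attn.q_proj", a0), ("self_attn.k_proj", a1), ("self_attn.v_proj", a2),
        ("self_attn.o_proj", a3), ("mlp.gate_proj", a4), ("mlp.up_proj", a5),
        ("mlp.down_proj", a6)]⟩
    = ⟨[("self_attn.q_proj", a0 ++ [x0]), ("self_attn.k_proj", a1 ++ [x1]),
        ("self_attn.v_proj", a2 ++ [x2]), ("self_attn.o_proj", a3 ++ [x3]),
        ("mlp.gate_proj", a4 ++ [x4]), ("mlp.up_proj", a5 ++ [x5]),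
        ("mlp.down_proj", a6 ++ [x6])]⟩ := by
  rfl

lemma h7cast : (param_order.length : Int) = ((7 : Nat) : Int) := rfl

lemma outer_inv (data : List Int) (N : Nat) (h : N * 7 ≤ data.length) :
    (PySem.List.pyRange 0 (N : Int)).foldl (pvOuterStep data)
      (param_order.foldl (fun d p => PySem.Dict.insert d p ([] : List Int)) ⟨[]⟩)
    = ⟨canon data N⟩ := by
  induction N with
  | zero => rfl
  | succ m ih =>
      have hm : m * 7 ≤ data.length := by omega
      have hcast : ((m + 1 : Nat) : Int) = (m : Int) + 1 := by push_cast; ring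
      rw [hcast, PySem.List.pyRange_one_succ_right (by positivity), List.foldl_append,
        ih hm, List.foldl_cons, List.foldl_nil]
      show (param_order.zip (PySem.List.slice data (some ((m : Int) * (param_order.length : Int)))
          (some ((m : Int) * (param_order.length : Int) + (param_order.length : Int))))).foldl
          (fun r pv => PySem.Dict.modify r pv.1 [] (fun l => l ++ [pv.2])) ⟨canon data m⟩
        = ⟨canon data (m + 1)⟩
      have hidx : (m : Int) * (param_order.length : Int) = ((m * 7 : Nat) : Int) := by
        rw [h7cast]; push_cast; ring
      have hslice : PySem.List.slice data (some ((m : Int) * (param_order.length : Int)))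
          (some ((m : Int) * (param_order.length : Int) + (param_order.length : Int)))
          = (data.drop (m * 7)).take 7 := by
        rw [hidx, h7cast, PySem.List.slice_natCast_add]
      have hlen7 : (7 : Nat) ≤ (data.drop (m * 7)).length := by
        simp [List.length_drop]; omega
      rw [hslice, take7 _ hlen7]
      simp only [getD_drop]
      show (param_order.zip _).foldl _ (⟨canon data m⟩ : PySem.Dict String (List Int)) = _
      unfold canon
      rw [inner_step]
      simp [colUpto_succ]

-- the value each key gets in B's fold (named for the proofs)
def pvCol (data : List Int) (j : Int) : List Int :=
  (PySem.List.pyRange 0 (PySem.Int.floordiv (data.length : Int) (param_order.length : Int))).map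
    (fun i => PySem.List.pyGetD data (j + i * (param_order.length : Int)) 0)

lemma alt_fold (data : List Int) :
    same_layer_reset_alt data =
      [("self_attn.q_proj", pvCol data 0), ("self_attn.k_proj", pvCol data 1),
       ("self_attn.v_proj", pvCol data 2), ("self_attn.o_proj", pvCol data 3),
       ("mlp.gate_proj", pvCol data 4), ("mlp.up_proj", pvCol data 5),
       ("mlp.down_proj", pvCol data 6)] := rfl

lemma pvCol_eq (data : List Int) (j : Nat) :
    pvCol data (j : Int) = colUpto data j (data.length / 7) := by
  unfold pvCol
  rw [h7cast, PySem.Int.floordiv_natCast, PySem.List.pyRange_zero]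
  simp only [List.map_map, Int.toNat_natCast, colUpto]
  apply List.map_congr_left
  intro i _
  show PySem.List.pyGetD data ((j : Int) + (i : Int) * ((7 : Nat) : Int)) 0 = data.getD (i * 7 + j) 0
  have hc : (j : Int) + (i : Int) * ((7 : Nat) : Int) = ((i * 7 + j : Nat) : Int) := by
    push_cast; ring
  rw [hc, PySem.List.pyGetD_natCast]

lemma alt_eq_canon (data : List Int) :
    same_layer_reset_alt data = canon data (data.length / 7) := by
  have e0 := pvCol_eq data 0
  have e1 := pvCol_eq data 1
  have e2 := pvCol_eq data 2
  have e3 := pvCol_eq data 3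
  have e4 := pvCol_eq data 4
  have e5 := pvCol_eq data 5
  have e6 := pvCol_eq data 6
  norm_num at e0 e1 e2 e3 e4 e5 e6
  rw [alt_fold, canon, e0, e1, e2, e3, e4, e5, e6]

-- ===== VERDICT (by name: the statement is the Claim_ definition above) =====
theorem same_layer_reset_spec : Claim_equal_same_layer_reset := by
  intro data _
  show same_layer_reset data = same_layer_reset_alt data
  rw [alt_eq_canon]
  show ((PySem.List.pyRange 0 (PySem.Int.floordiv (data.length : Int) (param_order.length : Int))).foldl
      (pvOuterStep data)
      (param_order.foldl (fun d p => PySem.Dict.insert d p ([] : List Int)) ⟨[]⟩)).items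
    = canon data (data.length / 7)
  rw [h7cast, PySem.Int.floordiv_natCast,
    outer_inv data (data.length / 7) (by have := Nat.div_mul_le_self data.length 7; omega)]
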